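-- pv_equiv track=rewrite | github.com/acx01b/covariants | scripts/convert_to_web_app_json.py | diff_left_closed
-- ===== SOURCE A (Python) =====
-- def diff_left_closed(big, small):
--     """
--     Calculates a difference between a larger list and a smaller list.
--     Boundaries are included into the diff. The difference is sorted.
--     """
--     diff = set()
--     N = len(big)
--     for i, curr in enumerate(big):
--         if curr not in small:
--             diff.add(curr)  # Add current
--
--             if i > 0:
--                 # Add previous
--                 prev = big[i - 1]
--                 diff.add(prev)
--             if i < (N - 1):
--                 # Add next
--                 next_ = big[i + 1]
--                 diff.add(next_)
--
--     return sorted(list(diff))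
-- ===== SOURCE B (Python) =====
-- def diff_left_closed(big, small):
--     """
--     Calculates a difference between a larger list and a smaller list.
--     Boundaries are included into the diff. The difference is sorted.
--     """
--     N = len(big)
--     miss = [c not in small for c in big]
--     keep = [miss[j] or (j > 0 and miss[j - 1]) or (j + 1 < N and miss[j + 1])
--             for j in range(N)]
--     kept = sorted(v for v, k in zip(big, keep) if k)
--     if not kept:
--         return []
--     # adjacent deduplication of the sorted list via consecutive pairs
--     return [kept[0]] + [b for a, b in zip(kept, kept[1:]) if a != b]
-- ===== Notes on version B (the rewrite author's own statement) =====
-- stated objective: alternative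
-- what changed: B uses no set at all: it builds a boolean missing-mask over big, ORs each position with its in-range neighbors into a keep-mask, selects the kept values by zipping big with the mask, sorts them with duplicates, and removes duplicates by comparing consecutive pairs of the sorted list; A pushes curr/prev/next values into a hash set in one indexed pass and sorts the set.
import Mathlib
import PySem

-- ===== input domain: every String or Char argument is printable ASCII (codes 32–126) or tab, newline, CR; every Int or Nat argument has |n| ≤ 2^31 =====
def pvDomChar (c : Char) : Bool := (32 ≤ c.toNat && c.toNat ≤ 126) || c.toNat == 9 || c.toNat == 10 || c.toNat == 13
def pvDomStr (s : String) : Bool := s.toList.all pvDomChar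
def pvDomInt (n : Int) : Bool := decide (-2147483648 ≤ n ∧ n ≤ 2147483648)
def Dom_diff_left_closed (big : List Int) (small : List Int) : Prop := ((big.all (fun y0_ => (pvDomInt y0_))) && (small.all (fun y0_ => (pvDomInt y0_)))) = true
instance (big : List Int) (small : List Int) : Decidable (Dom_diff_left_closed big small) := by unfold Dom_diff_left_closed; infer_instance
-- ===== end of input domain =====

-- B avoids the set entirely: a boolean missing-mask over big, a neighbor-OR keep-mask,
-- value selection by zip, an explicit sort with duplicates and a recursive adjacent
-- deduplication; A pushes curr/prev/next into a hash set in one pass and sorts it.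

-- ===== PORT A =====
-- fetch big[idx] and add it to the set (the 'prev = big[i-1]; diff.add(prev)' pattern)
def addIdxA (big : List Int) (s : PySem.Set Int) (idx : Int) : PySem.Set Int :=
  match PySem.List.pyGet? big idx with
  | some v => PySem.Set.add s v
  | none => s   -- unreachable: every use is guarded in range

-- loop body of A: add curr, then prev if i > 0, then next if i < N - 1
def stepA (big : List Int) (small : List Int) (s : PySem.Set Int) (p : Int × Int) : PySem.Set Int :=
  if small.contains p.2 then s
  else
    let s1 := PySem.Set.add s p.2
    let s2 := if 0 < p.1 then addIdxA big s1 (p.1 - 1) else s1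
    if p.1 < (big.length : Int) - 1 then addIdxA big s2 (p.1 + 1) else s2

def diff_left_closed (big : List Int) (small : List Int) : List Int :=
  PySem.List.sorted
    ((PySem.List.enumerate big).foldl (stepA big small) PySem.Set.empty)
    (fun x => x) false

-- ===== PORT B =====
-- miss = [c not in small for c in big]
def missMask (big : List Int) (small : List Int) : List Bool :=
  big.map (fun c => !(small.contains c))

-- keep-bit for position j: miss[j] or (j > 0 and miss[j-1]) or (j+1 < N and miss[j+1])
def keepBit (miss : List Bool) (N : Nat) (j : Nat) : Bool :=
  miss.getD j false || (decide (0 < j) && miss.getD (j - 1) false)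
    || (decide (j + 1 < N) && miss.getD (j + 1) false)

-- adjacent deduplication via consecutive pairs: [kept[0]] + [b for a,b in zip(kept, kept[1:]) if a != b]
-- (kept[1:] is kept.drop 1 — exact, the list is a plain list)
def pairDedup (kept : List Int) : List Int :=
  match kept with
  | [] => []
  | x :: _ => x :: ((kept.zip (kept.drop 1)).filter (fun p => p.1 != p.2)).map (·.2)

def diff_left_closed_alt (big : List Int) (small : List Int) : List Int :=
  let N := big.length
  let miss := missMask big small
  let keep := (List.range N).map (keepBit miss N)
  let kept := PySem.List.sorted (((big.zip keep).filter (fun p => p.2)).map (·.1)) (fun x => x) false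
  pairDedup kept

-- ===== PRECONDITION & SPEC =====
def Spec_diff_left_closed (big : List Int) (small : List Int) (out : List Int) : Prop := out = diff_left_closed_alt big small
instance (big : List Int) (small : List Int) (out : List Int) : Decidable (Spec_diff_left_closed big small out) := by unfold Spec_diff_left_closed; infer_instance

-- ===== CLAIM (what is proved, stated in full; the proofs are below) =====
def Claim_equal_diff_left_closed : Prop := ∀ (big : List Int) (small : List Int), Dom_diff_left_closed big small → Spec_diff_left_closed big small (diff_left_closed big small)

-- ===== LEMMAS AND PROOFS =====

-- proof-side recursive view of pairDedup
def dedupAdj : List Int → List Int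
  | [] => []
  | [v] => [v]
  | v :: w :: t => if v = w then dedupAdj (w :: t) else v :: dedupAdj (w :: t)

lemma pairDedup_eq_dedupAdj : ∀ l : List Int, pairDedup l = dedupAdj l := by
  intro l
  induction l with
  | nil => rfl
  | cons x t ih =>
      cases t with
      | nil => rfl
      | cons w t' =>
          by_cases h : x = w
          · subst h
            simp only [pairDedup, dedupAdj, List.drop_succ_cons, List.drop_zero,
              List.zip_cons_cons, List.filter_cons, bne_self_eq_false] at *
            exact ih
          · have hb : (x != w) = true := by simp [h]
            simp only [pairDedup, dedupAdj, if_neg h, List.drop_succ_cons, List.drop_zero,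
              List.zip_cons_cons, List.filter_cons, hb, if_true, List.map_cons] at *
            rw [ih]

-- MissAt big small i: position i exists and its value is not in small
def MissAt (big : List Int) (small : List Int) (i : Nat) : Prop :=
  ∃ c, big[i]? = some c ∧ small.contains c = false

lemma mem_foldl_iff {β : Type} (f : PySem.Set Int → β → PySem.Set Int) (C : β → Prop) (y : Int)
    (hf : ∀ s p, y ∈ f s p ↔ y ∈ s ∨ C p) :
    ∀ (l : List β) (s : PySem.Set Int), y ∈ l.foldl f s ↔ y ∈ s ∨ ∃ p ∈ l, C p := by
  intro l
  induction l with
  | nil => intro s; simp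
  | cons p t ih =>
      intro s
      simp only [List.foldl_cons, ih, hf, List.mem_cons]
      constructor
      · rintro ((h | h) | ⟨q, hq, hC⟩)
        · exact Or.inl h
        · exact Or.inr ⟨p, Or.inl rfl, h⟩
        · exact Or.inr ⟨q, Or.inr hq, hC⟩
      · rintro (h | ⟨q, (rfl | hq), hC⟩)
        · exact Or.inl (Or.inl h)
        · exact Or.inl (Or.inr hC)
        · exact Or.inr ⟨q, hq, hC⟩

lemma nodup_foldl {β : Type} (f : PySem.Set Int → β → PySem.Set Int)
    (hf : ∀ s p, s.Nodup → (f s p).Nodup) :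
    ∀ (l : List β) (s : PySem.Set Int), s.Nodup → (l.foldl f s).Nodup := by
  intro l
  induction l with
  | nil => intro s h; simpa using h
  | cons p t ih => intro s h; exact ih _ (hf _ _ h)

lemma mem_addIdxA (big : List Int) (s : PySem.Set Int) (idx : Int) (y : Int) :
    y ∈ addIdxA big s idx ↔ y ∈ s ∨ PySem.List.pyGet? big idx = some y := by
  unfold addIdxA
  rcases hp : PySem.List.pyGet? big idx with _ | v <;>
    simp [PySem.Set.mem_add, eq_comm]

lemma nodup_addIdxA (big : List Int) (s : PySem.Set Int) (idx : Int)
    (h : s.Nodup) : (addIdxA big s idx).Nodup := by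
  unfold addIdxA
  rcases PySem.List.pyGet? big idx with _ | v
  · exact h
  · exact PySem.Set.nodup_add _ _ h

lemma mem_stepA (big small : List Int) (s : PySem.Set Int) (p : Int × Int) (y : Int) :
    y ∈ stepA big small s p ↔ y ∈ s ∨
      (small.contains p.2 = false ∧
        (y = p.2 ∨ (0 < p.1 ∧ PySem.List.pyGet? big (p.1 - 1) = some y) ∨
          (p.1 < (big.length : Int) - 1 ∧ PySem.List.pyGet? big (p.1 + 1) = some y))) := by
  unfold stepA
  by_cases hc : p.2 ∈ small
  · simp [hc]
  · by_cases h1 : 0 < p.1 <;> by_cases h2 : p.1 < (big.length : Int) - 1 <;>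
      simp [hc, h1, h2, mem_addIdxA, PySem.Set.mem_add] <;> tauto

lemma nodup_stepA (big small : List Int) (s : PySem.Set Int) (p : Int × Int)
    (h : s.Nodup) : (stepA big small s p).Nodup := by
  unfold stepA
  split_ifs <;>
    first
      | exact h
      | exact nodup_addIdxA _ _ _ (nodup_addIdxA _ _ _ (PySem.Set.nodup_add _ _ h))
      | exact nodup_addIdxA _ _ _ (PySem.Set.nodup_add _ _ h)
      | exact PySem.Set.nodup_add _ _ h

-- A's set, characterised with Nat indices: value y is collected iff some missing
-- position k has y at k, at k-1 (when 0 < k) or at k+1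
lemma mem_setA (big small : List Int) (y : Int) :
    y ∈ (PySem.List.enumerate big).foldl (stepA big small) PySem.Set.empty ↔
      ∃ k, MissAt big small k ∧
        (big[k]? = some y ∨ (0 < k ∧ big[k - 1]? = some y) ∨ big[k + 1]? = some y) := by
  rw [mem_foldl_iff (stepA big small) _ y (fun s p => mem_stepA big small s p y)]
  simp only [PySem.Set.empty, List.not_mem_nil, false_or, PySem.List.mem_enumerate_iff, zero_add]
  constructor
  · rintro ⟨p, ⟨k, hk, rfl⟩, hc, hC⟩
    refine ⟨k, ⟨big[k], List.getElem?_eq_getElem hk, hc⟩, ?_⟩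
    rcases hC with rfl | ⟨h1, h2⟩ | ⟨h1, h2⟩
    · exact Or.inl (List.getElem?_eq_getElem hk)
    · refine Or.inr (Or.inl ⟨by omega, ?_⟩)
      have he : ((k : Int) - 1) = ((k - 1 : Nat) : Int) := by omega
      rwa [he, PySem.List.pyGet?_natCast] at h2
    · refine Or.inr (Or.inr ?_)
      have he : ((k : Int) + 1) = ((k + 1 : Nat) : Int) := by omega
      rwa [he, PySem.List.pyGet?_natCast] at h2
  · rintro ⟨k, ⟨c, hcg, hc⟩, hv⟩
    obtain ⟨hk, hcv⟩ := List.getElem?_eq_some_iff.mp hcg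
    subst hcv
    refine ⟨(k, big[k]), ⟨k, hk, rfl⟩, hc, ?_⟩
    rcases hv with h | ⟨h1, h2⟩ | h
    · left
      rw [List.getElem?_eq_getElem hk, Option.some.injEq] at h
      exact h.symm
    · refine Or.inr (Or.inl ⟨by omega, ?_⟩)
      have he : ((k : Int) - 1) = ((k - 1 : Nat) : Int) := by omega
      rw [he, PySem.List.pyGet?_natCast]; exact h2
    · obtain ⟨hk1, _⟩ := List.getElem?_eq_some_iff.mp h
      refine Or.inr (Or.inr ⟨by omega, ?_⟩)
      have he : ((k : Int) + 1) = ((k + 1 : Nat) : Int) := by omega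
      rw [he, PySem.List.pyGet?_natCast]; exact h
 
-- membership in 'select by a boolean mask via zip'
lemma mem_zipFilterMap (xs : List Int) (ys : List Bool) (y : Int) :
    y ∈ ((xs.zip ys).filter (fun p => p.2)).map (·.1) ↔
      ∃ j : Nat, xs[j]? = some y ∧ ys[j]? = some true := by
  induction xs generalizing ys with
  | nil => simp
  | cons x xs ih =>
      cases ys with
      | nil => simp
      | cons b ys =>
          simp only [List.zip_cons_cons, List.filter_cons]
          constructor
          · intro h
            by_cases hb : b = true
            · simp only [hb, if_true, List.map_cons, List.mem_cons] at h
              rcases h with rfl | h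
              · exact ⟨0, by simp, by simp [hb]⟩
              · rcases (ih ys).mp h with ⟨j, h1, h2⟩
                exact ⟨j + 1, by simpa using h1, by simpa using h2⟩
            · rw [Bool.not_eq_true] at hb
              simp only [hb] at h
              rcases (ih ys).mp h with ⟨j, h1, h2⟩
              exact ⟨j + 1, by simpa using h1, by simpa using h2⟩
          · rintro ⟨j, h1, h2⟩
            cases j with
            | zero =>
                simp only [List.getElem?_cons_zero, Option.some.injEq] at h1 h2
                subst h1
                simp [h2]
            | succ j =>
                simp only [List.getElem?_cons_succ] at h1 h2
                have hm := (ih ys).mpr ⟨j, h1, h2⟩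
                by_cases hb : b = true <;> simp_all
 
lemma missMask_getD (big small : List Int) (i : Nat) :
    (missMask big small).getD i false = true ↔ MissAt big small i := by
  unfold missMask MissAt
  by_cases hi : i < big.length
  · simp [List.getD, List.getElem?_eq_getElem hi]
  · rw [List.getElem?_eq_none (by omega)]
    simp only [List.getD, List.getElem?_map, List.getElem?_eq_none (by omega : big.length ≤ i)]
    simp
 
lemma dedupAdj_mem (l : List Int) (y : Int) : y ∈ dedupAdj l ↔ y ∈ l := by
  induction l with
  | nil => simp [dedupAdj]
  | cons v t ih =>
      cases t with
      | nil => simp [dedupAdj]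
      | cons w t =>
          by_cases h : v = w
          · subst h
            simp [dedupAdj, ih]
          · simp only [dedupAdj, h, if_false, List.mem_cons, ih]

lemma dedupAdj_pairwise (l : List Int) (h : l.Pairwise (· ≤ ·)) :
    (dedupAdj l).Pairwise (· < ·) := by
  induction l with
  | nil => simp [dedupAdj]
  | cons v t ih =>
      cases t with
      | nil => simp [dedupAdj]
      | cons w t =>
          rcases List.pairwise_cons.mp h with ⟨hv, hwt⟩
          by_cases hvw : v = w
          · simpa [dedupAdj, hvw] using ih hwt
          · simp only [dedupAdj, hvw, if_false]
            refine List.pairwise_cons.mpr ⟨?_, ih hwt⟩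
            intro x hx
            rcases List.mem_cons.mp ((dedupAdj_mem _ x).mp hx) with rfl | hxt
            · exact lt_of_le_of_ne (hv x (by simp)) hvw
            · have hwx : w ≤ x := (List.pairwise_cons.mp hwt).1 x hxt
              exact lt_of_lt_of_le (lt_of_le_of_ne (hv w (by simp)) hvw) hwx

-- the 'pull' characterisation (a kept position next to a missing one) equals the
-- 'push' characterisation (a missing position with its window values)
lemma bridge (big small : List Int) (y : Int) :
    (∃ j, big[j]? = some y ∧
        (MissAt big small j ∨ (0 < j ∧ MissAt big small (j - 1)) ∨ MissAt big small (j + 1))) ↔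
      ∃ k, MissAt big small k ∧
        (big[k]? = some y ∨ (0 < k ∧ big[k - 1]? = some y) ∨ big[k + 1]? = some y) := by
  constructor
  · rintro ⟨j, hy, hm | ⟨h0, hm⟩ | hm⟩
    · exact ⟨j, hm, Or.inl hy⟩
    · refine ⟨j - 1, hm, Or.inr (Or.inr ?_)⟩
      rw [show j - 1 + 1 = j by omega]
      exact hy
    · refine ⟨j + 1, hm, Or.inr (Or.inl ⟨by omega, ?_⟩)⟩
      rw [Nat.add_sub_cancel]
      exact hy
  · rintro ⟨k, hm, hy | ⟨h0, hy⟩ | hy⟩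
    · exact ⟨k, hy, Or.inl hm⟩
    · refine ⟨k - 1, hy, Or.inr (Or.inr ?_)⟩
      rw [show k - 1 + 1 = k by omega]
      exact hm
    · refine ⟨k + 1, hy, Or.inr (Or.inl ⟨by omega, ?_⟩)⟩
      rw [Nat.add_sub_cancel]
      exact hm
 
-- membership in B's selected value list, in A's 'push' form
lemma mem_keptB (big small : List Int) (y : Int) :
    y ∈ (((big.zip ((List.range big.length).map (keepBit (missMask big small) big.length))).filter
        (fun p => p.2)).map (·.1)) ↔
      ∃ k, MissAt big small k ∧
        (big[k]? = some y ∨ (0 < k ∧ big[k - 1]? = some y) ∨ big[k + 1]? = some y) := by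
  rw [mem_zipFilterMap, ← bridge big small y]
  have hkb : ∀ j : Nat, j < big.length →
      (keepBit (missMask big small) big.length j = true ↔
        (MissAt big small j ∨ (0 < j ∧ MissAt big small (j - 1)) ∨ MissAt big small (j + 1))) := by
    intro j hj
    unfold keepBit
    simp only [Bool.or_eq_true, Bool.and_eq_true, decide_eq_true_eq, missMask_getD]
    constructor
    · rintro ((h | ⟨h0, h⟩) | ⟨hn, h⟩)
      · exact Or.inl h
      · exact Or.inr (Or.inl ⟨h0, h⟩)
      · exact Or.inr (Or.inr h)
    · rintro (h | ⟨h0, h⟩ | h)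
      · exact Or.inl (Or.inl h)
      · exact Or.inl (Or.inr ⟨h0, h⟩)
      · obtain ⟨c, hc, -⟩ := id h
        obtain ⟨hb, -⟩ := List.getElem?_eq_some_iff.mp hc
        exact Or.inr ⟨hb, h⟩
  constructor
  · rintro ⟨j, h1, h2⟩
    obtain ⟨hj, -⟩ := List.getElem?_eq_some_iff.mp h1
    refine ⟨j, h1, ?_⟩
    rw [List.getElem?_eq_getElem (by simpa using hj), Option.some.injEq] at h2
    simp only [List.getElem_map, List.getElem_range] at h2
    exact (hkb j hj).mp h2
  · rintro ⟨j, h1, h2⟩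
    obtain ⟨hj, -⟩ := List.getElem?_eq_some_iff.mp h1
    refine ⟨j, h1, ?_⟩
    rw [List.getElem?_eq_getElem (by simpa using hj), Option.some.injEq]
    simp only [List.getElem_map, List.getElem_range]
    exact (hkb j hj).mpr h2
 
-- ===== VERDICT (by name: the statement is the Claim_ definition above) =====
theorem diff_left_closed_spec : Claim_equal_diff_left_closed := by
  intro big small _
  unfold Spec_diff_left_closed
  simp only [diff_left_closed, diff_left_closed_alt]
  have hsorted :
      (PySem.List.sorted (((big.zip ((List.range big.length).map
          (keepBit (missMask big small) big.length))).filter (fun p => p.2)).map (·.1))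
        (fun x => x) false).Pairwise (· ≤ ·) := by
    simpa using PySem.List.sorted_pairwise (((big.zip ((List.range big.length).map
      (keepBit (missMask big small) big.length))).filter (fun p => p.2)).map (·.1)) (fun x => x)
  have hRpw := dedupAdj_pairwise _ hsorted
  rw [pairDedup_eq_dedupAdj]
  apply PySem.List.sorted_eq_of_perm_of_pairwise_lt
  · rw [List.perm_ext_iff_of_nodup]
    · intro y
      rw [dedupAdj_mem, PySem.List.mem_sorted, mem_keptB, mem_setA]
    · exact hRpw.imp (fun h => ne_of_lt h)
    · exact nodup_foldl _ (fun s p => nodup_stepA big small s p) _ _ List.nodup_nil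
  · simpa using hRpw
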